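-- pv_equiv track=rewrite | github.com/aman1108/Interview-Coding-Questions | Array/Partition Labels.py | solve
-- ===== SOURCE A (Python) =====
-- from collections import defaultdict
--
-- def solve(S):
--     n=len(S)
--     G=defaultdict(lambda :0)
--     for i in range(n):
--         G[S[i]]=i
--
--     cp=0
--     cl=0
--     i=0
--     ans=[]
--     while(i<n):
--         cp=max(cp,G[S[i]])
--         cl=cl+1
--         if (i==cp):
--             ans.append(cl)
--             cl=0
--         i=i+1
--     return ans
-- ===== SOURCE B (Python) =====
-- def solve(S):
--     iv = {}
--     for i, c in enumerate(S):
--         if c in iv: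
--             iv[c] = (iv[c][0], i)
--         else:
--             iv[c] = (i, i)
--     ans = []
--     cur = None
--     for s, e in iv.values():
--         if cur is None:
--             cur = (s, e)
--         elif s <= cur[1]:
--             cur = (cur[0], max(cur[1], e))
--         else:
--             ans.append(cur[1] - cur[0] + 1)
--             cur = (s, e)
--     if cur is not None:
--         ans.append(cur[1] - cur[0] + 1)
--     return ans
-- ===== Notes on version B (the rewrite author's own statement) =====
-- stated objective: faster
-- what changed: B builds a char -> (first,last) interval dict in one pass and then merges overlapping intervals in first-appearance order, replacing A's per-position greedy scan (dict lookup and running max at every index) with a merge loop over the distinct characters only.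
import Mathlib
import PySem

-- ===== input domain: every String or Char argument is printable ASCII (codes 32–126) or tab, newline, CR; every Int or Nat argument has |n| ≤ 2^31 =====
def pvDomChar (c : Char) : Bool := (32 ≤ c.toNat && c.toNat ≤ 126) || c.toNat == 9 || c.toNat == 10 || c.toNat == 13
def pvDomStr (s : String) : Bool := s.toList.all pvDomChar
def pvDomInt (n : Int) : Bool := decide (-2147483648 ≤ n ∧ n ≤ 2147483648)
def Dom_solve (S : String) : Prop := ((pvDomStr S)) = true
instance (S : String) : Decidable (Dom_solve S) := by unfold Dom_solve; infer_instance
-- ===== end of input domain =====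

-- B re-implements the partition-labels computation by building per-character (first,last) intervals
-- and merging overlapping intervals, instead of A's greedy max-last-index scan; same O(n) cost ("alternative").

-- ===== PORT A =====
-- step of A's while loop (cp = running max of last index, cl = current length, ans)
def pvAStep (G : PySem.Dict Char Int) (st : Int × Int × List Int) (p : Int × Char) : Int × Int × List Int :=
  let cp := max st.1 (G.getD p.2 0)
  let cl := st.2.1 + 1
  if p.1 = cp then (cp, 0, st.2.2 ++ [cl]) else (cp, cl, st.2.2)

def solve (S : String) : List Int :=
  let L := S.toList
  let G : PySem.Dict Char Int :=
    (PySem.List.enumerate L).foldl (fun G p => G.insert p.2 p.1) PySem.Dict.empty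
  let st := (PySem.List.enumerate L).foldl (pvAStep G) (0, 0, [])
  st.2.2

-- ===== PORT B =====
-- one pass of B's dict-building loop: new chars get (i, i), known chars keep their first index
def pvIvStep (d : PySem.Dict Char (Int × Int)) (p : Int × Char) : PySem.Dict Char (Int × Int) :=
  if d.contains p.2 then d.insert p.2 (((d.get? p.2).getD (0, 0)).1, p.1)
  else d.insert p.2 (p.1, p.1)

-- one step of B's interval-merge loop (cur = None ↔ Option.none)
def pvMStep (st : List Int × Option (Int × Int)) (q : Int × Int) : List Int × Option (Int × Int) :=
  match st.2 with
  | none => (st.1, some q)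
  | some c => if q.1 ≤ c.2 then (st.1, some (c.1, max c.2 q.2))
              else (st.1 ++ [c.2 - c.1 + 1], some q)

def solve_alt (S : String) : List Int :=
  let L := S.toList
  let iv : PySem.Dict Char (Int × Int) :=
    (PySem.List.enumerate L).foldl pvIvStep PySem.Dict.empty
  let st := iv.values.foldl pvMStep ([], none)
  match st.2 with
  | none => st.1
  | some c => st.1 ++ [c.2 - c.1 + 1]

-- ===== PRECONDITION & SPEC =====
def Spec_solve (S : String) (out : List Int) : Prop := out = solve_alt S
instance (S : String) (out : List Int) : Decidable (Spec_solve S out) := by unfold Spec_solve; infer_instance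

-- ===== CLAIM (what is proved, stated in full; the proofs are below) =====
def Claim_equal_solve : Prop := ∀ (S : String), Dom_solve S → Spec_solve S (solve S)

-- ===== LEMMAS AND PROOFS =====

-- last index of c recorded by A's first loop (0 if c never occurs)
def pvLstF (l : List (Int × Char)) (c : Char) : Int :=
  l.foldl (fun a p => if p.2 = c then p.1 else a) 0

def pvLst (L : List Char) (c : Char) : Int := pvLstF (PySem.List.enumerate L) c

-- scalar mirror of B's dict-building step at one key c
def pvPStep (c : Char) (o : Option (Int × Int)) (p : Int × Char) : Option (Int × Int) :=
  if p.2 = c then some (match o with | none => (p.1, p.1) | some q => (q.1, p.1)) else o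

def pvPfF (l : List (Int × Char)) (c : Char) : Option (Int × Int) :=
  l.foldl (pvPStep c) none

def pvFst (L : List Char) (c : Char) : Int :=
  ((pvPfF (PySem.List.enumerate L) c).getD (0, 0)).1

def pvIv (L : List Char) (c : Char) : Int × Int := (pvFst L c, pvLst L c)

-- A's lookup dict computes pvLstF
theorem pv_getD_lst (l : List (Int × Char)) (d : PySem.Dict Char Int) (c : Char) :
    (l.foldl (fun G p => G.insert p.2 p.1) d).getD c 0
      = l.foldl (fun a p => if p.2 = c then p.1 else a) (d.getD c 0) := by
  induction l generalizing d with
  | nil => rfl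
  | cons p t ih =>
      simp only [List.foldl_cons]
      rw [ih]
      congr 1
      rw [PySem.Dict.getD_insert]
      by_cases h : p.2 = c
      · simp [h]
      · simp [h, Ne.symm h]

-- B's dict-building fold, observed through get? at one key, is the scalar fold pvPStep
theorem pv_get?_pf (l : List (Int × Char)) (d : PySem.Dict Char (Int × Int)) (c : Char) :
    (l.foldl pvIvStep d).get? c = l.foldl (pvPStep c) (d.get? c) := by
  induction l generalizing d with
  | nil => rfl
  | cons p t ih =>
      simp only [List.foldl_cons]
      rw [ih]
      congr 1
      unfold pvIvStep pvPStep
      by_cases h : p.2 = c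
      · subst h
        rw [PySem.Dict.contains_eq_isSome_get?]
        cases hg : d.get? p.2 with
        | none => simp
        | some q => simp
      · simp [h, PySem.Dict.contains_eq_isSome_get?]
        by_cases hc : (d.get? p.2).isSome <;>
          simp [hc, PySem.Dict.get?_insert, Ne.symm h]

-- structure of pvPfF / pvLstF on an enumerated list: first and last occurrence indices
theorem pv_pf_facts (L : List Char) (c : Char) :
    (c ∉ L → pvPfF (PySem.List.enumerate L) c = none ∧ pvLst L c = 0)
    ∧ (c ∈ L → ∃ f e : Int,
        pvPfF (PySem.List.enumerate L) c = some (f, e) ∧ pvLst L c = e ∧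
        0 ≤ f ∧ f ≤ e ∧ e < L.length ∧
        (∀ j : Nat, L[j]? = some c → f ≤ (j : Int) ∧ (j : Int) ≤ e) ∧
        (∃ j : Nat, L[j]? = some c ∧ f = (j : Int) ∧ c ∉ L.take j)) := by
  induction L using List.reverseRecOn with
  | nil =>
      exact ⟨fun _ => ⟨rfl, rfl⟩, fun h => absurd h (by simp)⟩
  | append_singleton M x ih =>
      have hE : PySem.List.enumerate (M ++ [x]) = PySem.List.enumerate M ++ [((M.length : Int), x)] := by
        rw [show PySem.List.enumerate (M ++ [x]) = PySem.List.enumerate (M ++ [x]) 0 from rfl,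
          PySem.List.enumerate_append]
        simp [PySem.List.enumerate_cons, PySem.List.enumerate_nil]
      have hpf : pvPfF (PySem.List.enumerate (M ++ [x])) c
          = pvPStep c (pvPfF (PySem.List.enumerate M) c) ((M.length : Int), x) := by
        rw [pvPfF, hE, List.foldl_append]; rfl
      have hlst : pvLst (M ++ [x]) c = (if x = c then (M.length : Int) else pvLst M c) := by
        rw [pvLst, pvLstF, hE, List.foldl_append]; rfl
      constructor
      · intro hc
        have hcM : c ∉ M := fun h => hc (by simp [h])
        have hcx : x ≠ c := fun h => hc (by simp [h])
        refine ⟨?_, ?_⟩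
        · rw [hpf, (ih.1 hcM).1]; simp [pvPStep, hcx]
        · rw [hlst, if_neg hcx, (ih.1 hcM).2]
      · intro hc
        by_cases hcx : c = x
        · subst hcx
          by_cases hxM : c ∈ M
          · obtain ⟨f, e, hpf0, hlst0, hf0, hfe, helt, hocc, j0, hj0, hfj0, hnt⟩ := ih.2 hxM
            have hfn : f ≤ (M.length : Int) := hfe.trans helt.le
            refine ⟨f, M.length, ?_, ?_, hf0, hfn, ?_, ?_, ?_⟩
            · rw [hpf, hpf0]; simp [pvPStep]
            · rw [hlst]; simp
            · simp only [List.length_append, List.length_cons, List.length_nil]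
              push_cast; omega
            · intro j hj
              have hjlt : j < M.length + 1 := by
                have h2 := (List.getElem?_eq_some_iff.mp hj).1; simpa using h2
              rcases Nat.lt_or_ge j M.length with h | h
              · rw [List.getElem?_append_left h] at hj
                exact ⟨(hocc j hj).1, by exact_mod_cast Nat.le_of_lt_succ hjlt⟩
              · have hje : j = M.length := by omega
                subst hje
                exact ⟨hfn, le_refl _⟩
            · have hj0lt : j0 < M.length := by
                have h2 := (List.getElem?_eq_some_iff.mp hj0).1; simpa using h2
              refine ⟨j0, ?_, hfj0, ?_⟩
              · rw [List.getElem?_append_left hj0lt]; exact hj0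
              · rw [List.take_append_of_le_length hj0lt.le]; exact hnt
          · have h0 := ih.1 hxM
            refine ⟨M.length, M.length, ?_, ?_, Int.natCast_nonneg _, le_refl _, ?_, ?_, ?_⟩
            · rw [hpf, h0.1]; simp [pvPStep]
            · rw [hlst]; simp
            · simp only [List.length_append, List.length_cons, List.length_nil]
              push_cast; omega
            · intro j hj
              have hjlt : j < M.length + 1 := by
                have h2 := (List.getElem?_eq_some_iff.mp hj).1; simpa using h2
              rcases Nat.lt_or_ge j M.length with h | h
              · rw [List.getElem?_append_left h] at hj
                exact absurd (List.mem_of_getElem? hj) hxM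
              · have hje : j = M.length := by omega
                subst hje
                exact ⟨le_refl _, le_refl _⟩
            · refine ⟨M.length, List.getElem?_concat_length, rfl, ?_⟩
              rw [List.take_append_of_le_length (le_refl _), List.take_length]
              exact hxM
        · have hcM : c ∈ M := by
            rcases List.mem_append.mp hc with h | h
            · exact h
            · exact absurd (List.mem_singleton.mp h) hcx
          obtain ⟨f, e, hpf0, hlst0, hf0, hfe, helt, hocc, j0, hj0, hfj0, hnt⟩ := ih.2 hcM
          have hxc : x ≠ c := fun h => hcx h.symm
          refine ⟨f, e, ?_, ?_, hf0, hfe, ?_, ?_, ?_⟩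
          · rw [hpf, hpf0]; simp [pvPStep, hxc]
          · rw [hlst, if_neg hxc]; exact hlst0
          · simp only [List.length_append, List.length_cons, List.length_nil]
            push_cast at helt ⊢; omega
          · intro j hj
            have hjlt : j < M.length + 1 := by
              have h2 := (List.getElem?_eq_some_iff.mp hj).1; simpa using h2
            rcases Nat.lt_or_ge j M.length with h | h
            · rw [List.getElem?_append_left h] at hj
              exact hocc j hj
            · have hje : j = M.length := by omega
              subst hje
              rw [List.getElem?_concat_length] at hj
              exact absurd (Option.some.inj hj) hxc
          · have hj0lt : j0 < M.length := by
              have h2 := (List.getElem?_eq_some_iff.mp hj0).1; simpa using h2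
            refine ⟨j0, ?_, hfj0, ?_⟩
            · rw [List.getElem?_append_left hj0lt]; exact hj0
            · rw [List.take_append_of_le_length hj0lt.le]; exact hnt

theorem pvMStep_none (a : List Int) (q : Int × Int) : pvMStep (a, none) q = (a, some q) := rfl

theorem pvMStep_some (a : List Int) (cs ce qf qe : Int) :
    pvMStep (a, some (cs, ce)) (qf, qe)
      = if qf ≤ ce then (a, some (cs, max ce qe)) else (a ++ [ce - cs + 1], some (qf, qe)) := rfl

-- merge state after a nonempty interval list: always an open block whose end dominates all ends
theorem pv_merge_max (iv : Char → Int × Int) (h1 : ∀ c, (iv c).1 ≤ (iv c).2)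
    (P : List Char) (hP : P ≠ []) (a0 : List Int) :
    ∃ ans cs ce, (P.map iv).foldl pvMStep (a0, none) = (ans, some (cs, ce)) ∧
      ∀ c ∈ P, (iv c).2 ≤ ce := by
  induction P using List.reverseRecOn with
  | nil => exact absurd rfl hP
  | append_singleton Q x ih =>
      rw [List.map_append, List.foldl_append]
      rcases eq_or_ne Q ([] : List Char) with hQ | hQ
      · subst hQ
        exact ⟨a0, (iv x).1, (iv x).2, rfl, by simp⟩
      · obtain ⟨ans, cs, ce, heq, hmax⟩ := ih hQ
        rw [heq]
        by_cases hle : (iv x).1 ≤ ce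
        · refine ⟨ans, cs, max ce (iv x).2, by simp [pvMStep, hle], ?_⟩
          intro c hc
          rcases List.mem_append.mp hc with h | h
          · exact (hmax c h).trans (le_max_left _ _)
          · rw [List.mem_singleton.mp h]; exact le_max_right _ _
        · refine ⟨ans ++ [ce - cs + 1], (iv x).1, (iv x).2, by simp [pvMStep, hle], ?_⟩
          intro c hc
          rcases List.mem_append.mp hc with h | h
          · exact le_trans (hmax c h) (le_trans (le_of_not_ge hle) (h1 x))
          · rw [List.mem_singleton.mp h]

-- duplicates are no-ops in the merge: folding per-position equals folding per-distinct-char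
theorem pv_merge_dedup (iv : Char → Int × Int) (h1 : ∀ c, (iv c).1 ≤ (iv c).2) (P : List Char) :
    ((PySem.Set.ofList P).map iv).foldl pvMStep ([], none)
      = (P.map iv).foldl pvMStep ([], none) := by
  induction P using List.reverseRecOn with
  | nil => rfl
  | append_singleton Q x ih =>
      have hset : PySem.Set.ofList (Q ++ [x]) = PySem.Set.add (PySem.Set.ofList Q) x := by
        rw [PySem.Set.ofList_eq_foldl, List.foldl_append, ← PySem.Set.ofList_eq_foldl]
        rfl
      by_cases hx : x ∈ Q
      · have hadd : PySem.Set.add (PySem.Set.ofList Q) x = PySem.Set.ofList Q := by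
          simp [PySem.Set.add, PySem.Set.mem_ofList, hx]
        rw [hset, hadd, ih, List.map_append, List.foldl_append]
        have hQ : Q ≠ [] := List.ne_nil_of_mem hx
        obtain ⟨ans, cs, ce, heq, hmax⟩ := pv_merge_max iv h1 Q hQ []
        rw [heq]
        have hle : (iv x).1 ≤ ce := le_trans (h1 x) (hmax x hx)
        simp [pvMStep, hle, max_eq_left (hmax x hx)]
      · have hadd : PySem.Set.add (PySem.Set.ofList Q) x = PySem.Set.ofList Q ++ [x] := by
          simp [PySem.Set.add, PySem.Set.mem_ofList, hx]
        rw [hset, hadd, List.map_append, List.foldl_append, ih,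
          List.map_append, List.foldl_append]

-- the central invariant tying A's scan state to the per-position interval merge state
theorem pv_main_inv (L : List Char) (j : Nat) (h1 : 1 ≤ j) (hj : j ≤ L.length) :
    ∃ ce cl ansA ansM cs,
      ((PySem.List.enumerate L).take j).foldl
          (fun st p =>
            let cp := max st.1 (pvLst L p.2)
            let cl := st.2.1 + 1
            if p.1 = cp then (cp, 0, st.2.2 ++ [cl]) else (cp, cl, st.2.2))
          ((0 : Int), (0 : Int), ([] : List Int)) = (ce, cl, ansA) ∧
      ((L.take j).map (pvIv L)).foldl pvMStep ([], none) = (ansM, some (cs, ce)) ∧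
      ce < L.length ∧ (∀ c ∈ L.take j, pvLst L c ≤ ce) ∧ 0 ≤ cs ∧
      ((cl = 0 ∧ ce = (j : Int) - 1 ∧ ansA = ansM ++ [ce - cs + 1]) ∨
       (1 ≤ cl ∧ cl = (j : Int) - cs ∧ (j : Int) ≤ ce ∧ ansA = ansM)) := by
  induction j with
  | zero => omega
  | succ j ih =>
    have hjn : j < L.length := by omega
    have hx : L[j]? = some (L[j]) := List.getElem?_eq_getElem hjn
    obtain ⟨f, e, hpfx, hlstx, hf0, hfe, helt, hocc, hfirst⟩ :=
      (pv_pf_facts L (L[j])).2 (List.mem_of_getElem? hx)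
    obtain ⟨hfj, hje⟩ := hocc j hx
    have hivx : pvIv L (L[j]) = (f, e) := by
      simp [pvIv, pvFst, hpfx, hlstx]
    have hTakeE : (PySem.List.enumerate L).take (j+1)
        = (PySem.List.enumerate L).take j ++ [((j:Int), L[j])] := by
      rw [List.take_add_one]
      congr 1
      rw [PySem.List.getElem?_enumerate]
      simp [hx]
    have hTakeL : L.take (j+1) = L.take j ++ [L[j]] := by
      rw [List.take_add_one, hx]
      rfl
    rw [hTakeE, hTakeL, List.foldl_append, List.map_append, List.foldl_append]
    rcases Nat.eq_zero_or_pos j with hj0 | hjpos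
    · -- base case: the very first character
      subst hj0
      have hf00 : f = 0 := le_antisymm (by exact_mod_cast hfj) hf0
      have he0 : (0:Int) ≤ e := by exact_mod_cast hje
      simp only [List.take_zero, List.map_nil, List.map_cons, List.foldl_nil, List.foldl_cons,
        hlstx, hivx, pvMStep_none, Nat.cast_zero]
      rw [max_eq_right he0]
      rcases eq_or_ne ((0:Int)) e with hcut | hcut
      · rw [if_pos hcut]
        refine ⟨e, 0, [] ++ [0 + 1], [], f, rfl, rfl, helt, ?_, hf0, Or.inl ⟨rfl, by omega, ?_⟩⟩
        · intro c hc
          simp only [List.nil_append, List.mem_singleton] at hc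
          rw [hc, hlstx]
        · simp only [List.nil_append, List.cons.injEq, and_true]
          omega
      · rw [if_neg hcut]
        refine ⟨e, 0 + 1, [], [], f, rfl, rfl, helt, ?_, hf0,
          Or.inr ⟨by norm_num, by omega, by omega, rfl⟩⟩
        intro c hc
        simp only [List.nil_append, List.mem_singleton] at hc
        rw [hc, hlstx]
    · -- inductive step
      obtain ⟨ce, cl, ansA, ansM, cs, hA, hM, hlt, hdom, hcs, hcase⟩ := ih hjpos (by omega)
      rw [hA, hM]
      simp only [List.foldl_cons, List.foldl_nil, List.map_cons, List.map_nil, hlstx, hivx,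
        pvMStep_some]
      rcases hcase with ⟨hcl0, hce, hansA⟩ | ⟨hcl1, hclv, hjce, hansA⟩
      · -- previous position closed a block
        have hjpos' : (1:Int) ≤ (j:Int) := by exact_mod_cast hjpos
        have hxnot : L[j] ∉ L.take j := by
          intro hmem
          have h2 := hdom _ hmem
          rw [hlstx] at h2
          omega
        have hfjeq : f = (j:Int) := by
          obtain ⟨j0, hj0get, hfj0, hj0not⟩ := hfirst
          rcases Nat.lt_or_ge j0 j with hlt2 | hge2
          · exfalso
            apply hxnot
            have h3 : (L.take j)[j0]? = some (L[j]) := by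
              rw [List.getElem?_take_of_lt hlt2]
              exact hj0get
            exact List.mem_of_getElem? h3
          · have h4 : (j:Int) ≤ f := by
              rw [hfj0]
              exact_mod_cast hge2
            omega
        have hnot : ¬ (f ≤ ce) := by omega
        have hmaxe : max ce e = e := max_eq_right (by omega)
        rw [if_neg hnot, hmaxe]
        rcases eq_or_ne ((j:Int)) e with hcut | hcut
        · refine ⟨e, 0, ansA ++ [cl + 1], ansM ++ [ce - cs + 1], f,
            by rw [if_pos hcut], rfl, helt, ?_, by omega, Or.inl ⟨rfl, by omega, ?_⟩⟩
          · intro c hc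
            rcases List.mem_append.mp hc with h | h
            · have h2 := hdom _ h
              omega
            · rw [List.mem_singleton.mp h, hlstx]
          · rw [hansA]
            congr 2
            omega
        · refine ⟨e, cl + 1, ansA, ansM ++ [ce - cs + 1], f,
            by rw [if_neg hcut], rfl, helt, ?_, by omega, Or.inr ⟨by omega, by omega, by omega, hansA⟩⟩
          intro c hc
          rcases List.mem_append.mp hc with h | h
          · have h2 := hdom _ h
            omega
          · rw [List.mem_singleton.mp h, hlstx]
      · -- still inside the current block
        have hyes : f ≤ ce := le_trans hfj hjce
        rw [if_pos hyes]
        rcases eq_or_ne ((j:Int)) (max ce e) with hcut | hcut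
        · refine ⟨max ce e, 0, ansA ++ [cl + 1], ansM, cs,
            by rw [if_pos hcut], rfl, by omega, ?_, hcs, Or.inl ⟨rfl, by omega, ?_⟩⟩
          · intro c hc
            rcases List.mem_append.mp hc with h | h
            · exact le_trans (hdom _ h) (le_max_left _ _)
            · rw [List.mem_singleton.mp h, hlstx]
              exact le_max_right _ _
          · rw [hansA]
            congr 2
            omega
        · have hmlt : max ce e < (L.length : Int) := by
            rcases max_choice ce e with h | h <;> omega
          refine ⟨max ce e, cl + 1, ansA, ansM, cs,
            by rw [if_neg hcut], rfl, hmlt, ?_, hcs, Or.inr ⟨by omega, by omega, ?_, hansA⟩⟩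
          · intro c hc
            rcases List.mem_append.mp hc with h | h
            · exact le_trans (hdom _ h) (le_max_left _ _)
            · rw [List.mem_singleton.mp h, hlstx]
              exact le_max_right _ _
          · have : ce ≤ max ce e := le_max_left _ _
            omega

-- assembly: both ports compute the same list
theorem pv_solve_eq (S : String) : solve S = solve_alt S := by
  rcases eq_or_ne S.toList ([] : List Char) with hL | hL
  · simp only [solve, solve_alt, hL, PySem.List.enumerate_nil, List.foldl_nil]
    rfl
  · have hn : 1 ≤ S.toList.length := List.length_pos_iff.mpr hL
    -- A's lookup dict is pvLst
    have hGfun : ∀ c, ((PySem.List.enumerate S.toList).foldl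
        (fun G p => G.insert p.2 p.1) PySem.Dict.empty).getD c 0 = pvLst S.toList c := by
      intro c
      rw [pv_getD_lst]
      rw [PySem.Dict.getD_empty]
      rfl
    -- B's dict step in insert form
    have hstep : pvIvStep = (fun (d : PySem.Dict Char (Int × Int)) (p : Int × Char) =>
        d.insert p.2 (if d.contains p.2 then (((d.get? p.2).getD (0, 0)).1, p.1)
                      else (p.1, p.1))) := by
      funext d p
      simp only [pvIvStep]
      by_cases h : d.contains p.2 <;> simp [h]
    have hkeys : ((PySem.List.enumerate S.toList).foldl pvIvStep PySem.Dict.empty).keys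
        = PySem.Set.ofList S.toList := by
      rw [hstep, PySem.Dict.keys_foldl_insert_key (PySem.List.enumerate S.toList)
          (fun p => p.2)
          (fun d p => if d.contains p.2 then (((d.get? p.2).getD (0, 0)).1, p.1) else (p.1, p.1))
          PySem.Dict.empty,
        PySem.Dict.keys_empty, PySem.List.map_snd_enumerate, PySem.Set.ofList_eq_foldl]
      rfl
    have hnodup : ((PySem.List.enumerate S.toList).foldl pvIvStep PySem.Dict.empty).keys.Nodup := by
      rw [hstep]
      exact PySem.Dict.nodup_keys_foldl_insert_key (PySem.List.enumerate S.toList)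
        (fun p => p.2)
        (fun d p => if d.contains p.2 then (((d.get? p.2).getD (0, 0)).1, p.1) else (p.1, p.1))
        PySem.Dict.empty (by simp [PySem.Dict.keys_empty])
    have hvals : ((PySem.List.enumerate S.toList).foldl pvIvStep PySem.Dict.empty).values
        = (PySem.Set.ofList S.toList).map (pvIv S.toList) := by
      rw [PySem.Dict.values_eq_map_keys _ hnodup (0, 0), hkeys]
      apply List.map_congr_left
      intro c hc
      have hcL : c ∈ S.toList := (PySem.Set.mem_ofList _ _).mp hc
      obtain ⟨f, e, hpf, hlst, _, _, _, _, _⟩ := (pv_pf_facts S.toList c).2 hcL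
      rw [PySem.Dict.getD_eq_get?_getD, pv_get?_pf, PySem.Dict.get?_empty]
      show (pvPfF (PySem.List.enumerate S.toList) c).getD (0, 0) = pvIv S.toList c
      rw [hpf]
      simp [pvIv, pvFst, hpf, hlst]
    have h1 : ∀ c, (pvIv S.toList c).1 ≤ (pvIv S.toList c).2 := by
      intro c
      by_cases hc : c ∈ S.toList
      · obtain ⟨f, e, hpf, hlst, _, hfe, _, _, _⟩ := (pv_pf_facts S.toList c).2 hc
        simp [pvIv, pvFst, hpf, hlst, hfe]
      · obtain ⟨hpf, hlst⟩ := (pv_pf_facts S.toList c).1 hc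
        simp [pvIv, pvFst, hpf, hlst]
    obtain ⟨ce, cl, ansA, ansM, cs, hA, hM, hlt, hdom, hcs, hcase⟩ :=
      pv_main_inv S.toList S.toList.length hn (le_refl _)
    have hEfull : (PySem.List.enumerate S.toList).take S.toList.length
        = PySem.List.enumerate S.toList := by
      have hlen : (PySem.List.enumerate S.toList).length = S.toList.length :=
        PySem.List.length_enumerate _ _
      rw [← hlen, List.take_length]
    rw [hEfull] at hA
    rw [List.take_length] at hM
    -- A's second fold with the dict lookup replaced by pvLst
    have hA' : (PySem.List.enumerate S.toList).foldl
        (pvAStep ((PySem.List.enumerate S.toList).foldl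
          (fun G p => G.insert p.2 p.1) PySem.Dict.empty)) (0, 0, []) = (ce, cl, ansA) := by
      rw [← hA]
      apply PySem.List.foldl_congr_mem
      intro acc x _
      simp [pvAStep, hGfun]
    have hB' : ((PySem.List.enumerate S.toList).foldl pvIvStep
        PySem.Dict.empty).values.foldl pvMStep ([], none) = (ansM, some (cs, ce)) := by
      rw [hvals, pv_merge_dedup _ h1]
      exact hM
    rcases hcase with ⟨hcl0, hce, hansA⟩ | ⟨_, _, hjce, _⟩
    · show ((PySem.List.enumerate S.toList).foldl (pvAStep _) (0, 0, [])).2.2 = _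
      rw [hA']
      show ansA = _
      rw [hansA]
      show _ = (match (((PySem.List.enumerate S.toList).foldl pvIvStep
        PySem.Dict.empty).values.foldl pvMStep ([], none)).2 with
        | none => (((PySem.List.enumerate S.toList).foldl pvIvStep
            PySem.Dict.empty).values.foldl pvMStep ([], none)).1
        | some c => (((PySem.List.enumerate S.toList).foldl pvIvStep
            PySem.Dict.empty).values.foldl pvMStep ([], none)).1 ++ [c.2 - c.1 + 1])
      rw [hB']
    · exfalso
      omega

-- ===== VERDICT (by name: the statement is the Claim_ definition above) =====
theorem solve_spec : Claim_equal_solve := by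
  intro S _
  exact pv_solve_eq S
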